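-- pv_equiv track=rewrite | github.com/mhbrewer/ArithmeticCalculator | src/RawExpression.py | __findValidBreakpoint
-- ===== SOURCE A (Python) =====
-- def __findValidBreakpoint(expressionInput):
--   multiplyBreakpoint = 1
--   leftExpressionInsideParen = False
--   parenCount = 0
--   for i in range(len(expressionInput)):
--     if expressionInput[i] == "(":
--       parenCount += 1
--       if i == 0:
--         leftExpressionInsideParen = True
--     if expressionInput[i] == ")":
--       parenCount -= 1
--     if leftExpressionInsideParen and parenCount == 0 and multiplyBreakpoint == 1:
--       multiplyBreakpoint = i+1
--     if parenCount == 0 and (expressionInput[i] == "+" or expressionInput[i] == "-"):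
--       return i
--   return multiplyBreakpoint
-- ===== SOURCE B (Python) =====
-- def __findValidBreakpoint(expressionInput):
--   # Phase 1: first '+' or '-' at paren depth 0.
--   depth = 0
--   for i, ch in enumerate(expressionInput):
--     if ch == '(':
--       depth += 1
--     elif ch == ')':
--       depth -= 1
--     elif depth == 0 and (ch == '+' or ch == '-'):
--       return i
--   # Phase 2: no top-level +/-; if the string opens with '(', breakpoint is
--   # just past the point where that paren's depth first returns to 0.
--   if expressionInput.startswith('('):
--     depth = 0
--     for i, ch in enumerate(expressionInput):
--       if ch == '(':
--         depth += 1
--       elif ch == ')':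
--         depth -= 1
--       if depth == 0:
--         return i + 1
--   return 1
-- ===== Notes on version B (the rewrite author's own statement) =====
-- stated objective: simpler
-- what changed: A's single interleaved scan carrying four pieces of state (index, multiplyBreakpoint, leftExpressionInsideParen, parenCount) is split into two independent simple phases: one scan returning the first '+'/'-' at paren depth 0, and only if none exists a second scan that, when the string starts with '(', returns the index just past where the depth first returns to 0, else 1.
import Mathlib
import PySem

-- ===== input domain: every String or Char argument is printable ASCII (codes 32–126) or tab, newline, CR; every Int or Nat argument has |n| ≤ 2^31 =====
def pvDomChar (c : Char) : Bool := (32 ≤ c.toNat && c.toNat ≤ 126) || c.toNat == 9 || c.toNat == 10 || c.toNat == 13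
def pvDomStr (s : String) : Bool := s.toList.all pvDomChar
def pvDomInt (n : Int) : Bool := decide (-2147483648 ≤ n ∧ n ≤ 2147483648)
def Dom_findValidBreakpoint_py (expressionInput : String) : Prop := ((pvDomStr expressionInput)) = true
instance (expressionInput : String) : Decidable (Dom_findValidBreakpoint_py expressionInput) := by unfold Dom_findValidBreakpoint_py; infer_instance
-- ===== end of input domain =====

-- B replaces A's single interleaved scan (four state variables) by two independent phases:
-- first top-level '+'/'-' index, else (when the string opens with '(') matching-close index + 1, else 1;
-- objective: simpler. Equivalence of return values is proved below.


-- ===== PORT A =====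
def findValidBreakpoint_py_go (cs : List Char) (i mbp : Int) (left : Bool) (pc : Int) : Int :=
  match cs with
  | [] => mbp
  | c :: rest =>
    let pc1 := if c = '(' then pc + 1 else if c = ')' then pc - 1 else pc
    let left1 := if c = '(' ∧ i = 0 then true else left
    let mbp1 := if left1 = true ∧ pc1 = 0 ∧ mbp = 1 then i + 1 else mbp
    if pc1 = 0 ∧ (c = '+' ∨ c = '-') then i
    else findValidBreakpoint_py_go rest (i + 1) mbp1 left1 pc1

-- exact: A's loop over range(len) with in-range indexing = structural recursion over the chars with the same state
def findValidBreakpoint_py (expressionInput : String) : Int :=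
  findValidBreakpoint_py_go expressionInput.toList 0 1 false 0

-- ===== PORT B =====
-- Phase 1: first '+'/'-' at depth 0
def fvbScanOp (cs : List Char) (i d : Int) : Option Int :=
  match cs with
  | [] => none
  | c :: rest =>
    let d1 := if c = '(' then d + 1 else if c = ')' then d - 1 else d
    if d1 = 0 ∧ (c = '+' ∨ c = '-') then some i else fvbScanOp rest (i + 1) d1

-- Phase 2: index just past where the depth first returns to 0; 1 if never
def fvbScanClose (cs : List Char) (i d : Int) : Int :=
  match cs with
  | [] => 1
  | c :: rest =>
    let d1 := if c = '(' then d + 1 else if c = ')' then d - 1 else d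
    if d1 = 0 then i + 1 else fvbScanClose rest (i + 1) d1

def findValidBreakpoint_py_alt (expressionInput : String) : Int :=
  match fvbScanOp expressionInput.toList 0 0 with
  | some i => i
  | none =>
    match expressionInput.toList with
    | '(' :: _ => fvbScanClose expressionInput.toList 0 0
    | _ => 1

-- ===== PRECONDITION & SPEC =====
def Spec_findValidBreakpoint_py (expressionInput : String) (out : Int) : Prop := out = findValidBreakpoint_py_alt expressionInput
instance (expressionInput : String) (out : Int) : Decidable (Spec_findValidBreakpoint_py expressionInput out) := by unfold Spec_findValidBreakpoint_py; infer_instance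

-- ===== CLAIM (what is proved, stated in full; the proofs are below) =====
def Claim_equal_findValidBreakpoint_py : Prop := ∀ (expressionInput : String), Dom_findValidBreakpoint_py expressionInput → Spec_findValidBreakpoint_py expressionInput (findValidBreakpoint_py expressionInput)

-- ===== LEMMAS AND PROOFS =====

theorem fvb_go_false (cs : List Char) : ∀ (i pc : Int), 1 ≤ i →
    findValidBreakpoint_py_go cs i 1 false pc = (fvbScanOp cs i pc).getD 1 := by
  induction cs with
  | nil => intro i pc _; simp [findValidBreakpoint_py_go, fvbScanOp]
  | cons c rest ih =>
    intro i pc hi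
    have hi0 : ¬ (c = '(' ∧ i = 0) := by rintro ⟨_, rfl⟩; omega
    simp only [findValidBreakpoint_py_go, fvbScanOp, if_neg hi0]
    split_ifs <;>
      first
        | exact ih _ _ (by omega)
        | simp
        | simp_all

theorem fvb_go_set (cs : List Char) : ∀ (i pc mbp : Int), mbp ≠ 1 →
    findValidBreakpoint_py_go cs i mbp true pc = (fvbScanOp cs i pc).getD mbp := by
  induction cs with
  | nil => intro i pc mbp _; simp [findValidBreakpoint_py_go, fvbScanOp]
  | cons c rest ih =>
    intro i pc mbp hm
    simp only [findValidBreakpoint_py_go, fvbScanOp]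
    split_ifs <;>
      first
        | exact ih _ _ _ hm
        | simp
        | simp_all

theorem fvb_go_open (cs : List Char) : ∀ (i pc : Int), 1 ≤ i →
    findValidBreakpoint_py_go cs i 1 true pc =
      (match fvbScanOp cs i pc with
       | some j => j
       | none => fvbScanClose cs i pc) := by
  induction cs with
  | nil => intro i pc _; simp [findValidBreakpoint_py_go, fvbScanOp, fvbScanClose]
  | cons c rest ih =>
    intro i pc hi
    have hL : (if c = '(' ∧ i = 0 then true else true) = true := by split_ifs <;> rfl
    simp only [findValidBreakpoint_py_go, fvbScanOp, fvbScanClose, hL]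
    set d1 := (if c = '(' then pc + 1 else if c = ')' then pc - 1 else pc) with hd1
    by_cases hcase : d1 = 0 ∧ (c = '+' ∨ c = '-')
    · simp [hcase]
    · simp only [if_neg hcase]
      split_ifs <;>
        first
          | (exfalso; tauto)
          | (rw [fvb_go_set rest (i + 1) d1 (i + 1) (by omega)];
             cases fvbScanOp rest (i + 1) d1 <;> simp)
          | rw [ih (i + 1) d1 (by omega)]

theorem findValidBreakpoint_py_spec : Claim_equal_findValidBreakpoint_py := by
  intro s _
  unfold Spec_findValidBreakpoint_py findValidBreakpoint_py findValidBreakpoint_py_alt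
  cases hcs : s.toList with
  | nil => simp [findValidBreakpoint_py_go, fvbScanOp]
  | cons c rest =>
    by_cases hpar : c = '('
    · subst hpar
      simp only [findValidBreakpoint_py_go, fvbScanOp, fvbScanClose]
      norm_num
      rw [fvb_go_open rest 1 1 (by omega)]
    · have hF : (if c = '(' ∧ True then true else false) = false := by simp [hpar]
      simp only [findValidBreakpoint_py_go, fvbScanOp, hF, Bool.false_eq_true, false_and,
        if_false]
      set D := (if c = '(' then (0 : Int) + 1 else if c = ')' then 0 - 1 else 0) with hD
      by_cases hop : D = 0 ∧ (c = '+' ∨ c = '-')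
      · simp [hop]
      · rw [if_neg hop, if_neg hop, fvb_go_false rest (0 + 1) D (by omega)]
        cases fvbScanOp rest (0 + 1) D <;> simp
        split <;> simp_all
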